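-- pv_equiv track=rewrite | github.com/PedroDRodrigues/FP_Project_2 | FP_2122_Projeto_1.py | obter_pin
-- ===== SOURCE A (Python) =====
-- def obter_digito(str1, dig1):
--     for i in range(len(str1)):
--         if str1[i] == 'B':
--             if dig1 < 7:
--                 dig1 += 3
--         if str1[i] == 'C':
--             if dig1 > 3:
--                 dig1 -=3
--         if str1[i] == 'D':
--             if dig1 != 3 and dig1 != 6 and dig1 != 9:
--                 dig1 += 1
--         if str1[i] == 'E':
--             if dig1 != 1 and dig1 != 4 and dig1 != 7:
--                 dig1 -= 1
--     return dig1
--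
-- def obter_pin(tuple1):
--     if not (isinstance(tuple1, tuple)):
--         raise ValueError('obter_pin: argumento invalido')
--     if len(tuple1) < 4 or len(tuple1) > 10:
--         raise ValueError('obter_pin: argumento invalido')
--
--     for i in range(len(tuple1)):
--         for j in range(len(tuple1[i])):
--             if tuple1[i][j] != 'C' and tuple1[i][j] != 'B' and tuple1[i][j] != 'D' and tuple1[i][j] != 'E':
--                 raise ValueError('obter_pin: argumento invalido')
--
--     else:
--         i = 1
--         j = 0
--         pin = ()
--
--         contador = obter_digito(tuple1[j], 5)
--         pin = pin + (contador,)
--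
--         while i < len(tuple1):
--             numero = obter_digito(tuple1[i], pin[j])
--             pin = pin + (numero,)
--             i += 1
--             j += 1
--
--         return pin
-- ===== SOURCE B (Python) =====
-- # B compiles each move string into a full 10-entry digit-transition table by
-- # composing fixed per-move tables over the whole keypad domain, then reads the
-- # PIN off by chained table lookups starting at 5 (no per-digit value guards).
--
-- IDENT = (0, 1, 2, 3, 4, 5, 6, 7, 8, 9)
-- MOVES = {
--     'B': (0, 4, 5, 6, 7, 8, 9, 7, 8, 9),  # down  (+3 when < 7)
--     'C': (0, 1, 2, 3, 1, 2, 3, 4, 5, 6),  # up    (-3 when > 3)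
--     'D': (0, 2, 3, 3, 5, 6, 6, 8, 9, 9),  # right (+1 unless col 2)
--     'E': (0, 1, 1, 2, 4, 4, 5, 7, 7, 8),  # left  (-1 unless col 0)
-- }
--
-- def _tabela(s):
--     t = IDENT
--     for ch in s:
--         m = MOVES[ch]
--         t = tuple(m[x] for x in t)
--     return t
--
-- def obter_pin(tuple1):
--     if not isinstance(tuple1, tuple):
--         raise ValueError('obter_pin: argumento invalido')
--     if not (4 <= len(tuple1) <= 10):
--         raise ValueError('obter_pin: argumento invalido')
--     if not set(''.join(tuple1)) <= set('BCDE'):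
--         raise ValueError('obter_pin: argumento invalido')
--     pin, d = [], 5
--     for t in map(_tabela, tuple1):
--         d = t[d]
--         pin.append(d)
--     return tuple(pin)
-- ===== Notes on version B (the rewrite author's own statement) =====
-- stated objective: alternative
-- what changed: B compiles each move string into a whole-domain 10-entry digit-transition table (composing fixed per-move lookup tables) and computes the PIN by chained table lookups from 5, instead of A's value-guarded arithmetic simulation of a single digit and index-driven while loop; Pre_ excludes only the inputs where both programs raise ValueError (length outside 4..10 or a character outside BCDE).
import Mathlib
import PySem

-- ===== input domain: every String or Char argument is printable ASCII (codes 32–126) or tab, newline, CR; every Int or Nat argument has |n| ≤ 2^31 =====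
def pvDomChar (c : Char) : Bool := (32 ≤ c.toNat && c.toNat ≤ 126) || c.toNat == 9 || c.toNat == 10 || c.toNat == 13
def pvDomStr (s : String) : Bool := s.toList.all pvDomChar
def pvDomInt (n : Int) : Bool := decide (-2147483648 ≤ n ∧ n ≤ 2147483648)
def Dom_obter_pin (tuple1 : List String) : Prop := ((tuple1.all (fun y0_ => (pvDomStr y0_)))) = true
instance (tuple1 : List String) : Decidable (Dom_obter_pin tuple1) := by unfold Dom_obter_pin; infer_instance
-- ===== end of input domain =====

-- B compiles each move string into a whole-domain 10-entry transition table (composing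
-- fixed per-move tables) and reads the PIN off by chained table lookups, instead of A's
-- value-guarded arithmetic on a single digit. Pre_ excludes exactly the inputs where the
-- Python A raises ValueError (B raises there too).

-- ===== PORT A =====
-- body of A's per-character update in obter_digito (four independent ifs, in order)
def stepA (dig1 : Int) (ch : Char) : Int :=
  let d1 := if ch = 'B' then (if dig1 < 7 then dig1 + 3 else dig1) else dig1
  let d2 := if ch = 'C' then (if d1 > 3 then d1 - 3 else d1) else d1
  let d3 := if ch = 'D' then (if d2 ≠ 3 ∧ d2 ≠ 6 ∧ d2 ≠ 9 then d2 + 1 else d2) else d2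
  if ch = 'E' then (if d3 ≠ 1 ∧ d3 ≠ 4 ∧ d3 ≠ 7 then d3 - 1 else d3) else d3

def obter_digito (str1 : String) (dig1 : Int) : Int :=
  str1.toList.foldl stepA dig1

-- A's while loop: i walks the remaining strings, pin grows at the back, previous digit feeds the next
def pinLoopA (rest : List String) (prev : Int) (pin : List Int) : List Int :=
  match rest with
  | [] => pin
  | s :: t =>
    let numero := obter_digito s prev
    pinLoopA t numero (pin ++ [numero])

def obter_pin (tuple1 : List String) : List Int :=
  -- Python raises ValueError on these two guards; the port returns [] there (excluded by Pre_)
  if tuple1.length < 4 ∨ tuple1.length > 10 then []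
  else if tuple1.any (fun s => s.toList.any
      (fun ch => ch ≠ 'C' ∧ ch ≠ 'B' ∧ ch ≠ 'D' ∧ ch ≠ 'E')) then []
  else match tuple1 with
    | [] => []  -- unreachable: length ≥ 4
    | s :: rest =>
      let contador := obter_digito s 5
      pinLoopA rest contador [contador]

-- ===== PORT B =====
def identTab : List Int := [0, 1, 2, 3, 4, 5, 6, 7, 8, 9]

def moveTab (ch : Char) : List Int :=
  if ch = 'B' then [0, 4, 5, 6, 7, 8, 9, 7, 8, 9]
  else if ch = 'C' then [0, 1, 2, 3, 1, 2, 3, 4, 5, 6]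
  else if ch = 'D' then [0, 2, 3, 3, 5, 6, 6, 8, 9, 9]
  else [0, 1, 1, 2, 4, 4, 5, 7, 7, 8]

-- tuple indexing t[x]; the index is always a table entry in 0..9, where this is exact
def lkp (t : List Int) (x : Int) : Int := t.getD x.toNat 0

-- t = tuple(m[x] for x in t)
def compoeTab (t : List Int) (ch : Char) : List Int := t.map (fun x => lkp (moveTab ch) x)

def tabela (s : String) : List Int := s.toList.foldl compoeTab identTab

-- B's for loop over map(_tabela, tuple1): d = t[d]; pin.append(d)
def pinLoopB (ts : List (List Int)) (d : Int) (pin : List Int) : List Int :=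
  match ts with
  | [] => pin
  | t :: r => pinLoopB r (lkp t d) (pin ++ [lkp t d])

def obter_pin_alt (tuple1 : List String) : List Int :=
  -- Python raises ValueError on these two guards; the port returns [] there (excluded by Pre_)
  if ¬ (4 ≤ tuple1.length ∧ tuple1.length ≤ 10) then []
  -- set(''.join(tuple1)) <= set('BCDE'), ported as an all-membership check (equivalent subset test)
  else if ¬ ((tuple1.flatMap String.toList).all
      (fun ch => ch = 'B' ∨ ch = 'C' ∨ ch = 'D' ∨ ch = 'E')) then []
  else pinLoopB (tuple1.map tabela) 5 []

-- ===== PRECONDITION & SPEC =====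
-- Pre_ holds exactly when the Python A (and B) return normally: tuple length 4..10 and every move character in {B,C,D,E}.
def Pre_obter_pin (tuple1 : List String) : Prop :=
  4 ≤ tuple1.length ∧ tuple1.length ≤ 10 ∧
  (tuple1.all (fun s => s.toList.all
    (fun ch => ch = 'B' ∨ ch = 'C' ∨ ch = 'D' ∨ ch = 'E'))) = true
instance (tuple1 : List String) : Decidable (Pre_obter_pin tuple1) := by
  unfold Pre_obter_pin; infer_instance

def pvWitness_obter_pin : List String := ["B", "DD", "CE", ""]

def Spec_obter_pin (tuple1 : List String) (out : List Int) : Prop := out = obter_pin_alt tuple1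
instance (tuple1 : List String) (out : List Int) : Decidable (Spec_obter_pin tuple1 out) := by unfold Spec_obter_pin; infer_instance

-- ===== CLAIM (what is proved, stated in full; the proofs are below) =====
def Claim_equal_obter_pin : Prop := ∀ (tuple1 : List String), Dom_obter_pin tuple1 → Pre_obter_pin tuple1 → Spec_obter_pin tuple1 (obter_pin tuple1)

-- ===== LEMMAS AND PROOFS =====

-- a table is well-formed when it has 10 entries and sends digits 1..9 to digits 1..9
def TabOK (t : List Int) : Prop :=
  t.length = 10 ∧ ∀ d : Int, 1 ≤ d → d ≤ 9 → 1 ≤ lkp t d ∧ lkp t d ≤ 9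

lemma moveTab_lkp (ch : Char) (hch : ch = 'B' ∨ ch = 'C' ∨ ch = 'D' ∨ ch = 'E')
    (x : Int) (h1 : 1 ≤ x) (h9 : x ≤ 9) :
    lkp (moveTab ch) x = stepA x ch ∧ 1 ≤ stepA x ch ∧ stepA x ch ≤ 9 := by
  interval_cases x <;> rcases hch with h | h | h | h <;> subst h <;> decide

lemma lkp_compoeTab (t : List Int) (ch : Char) (d : Int)
    (hlen : t.length = 10) (h1 : 1 ≤ d) (h9 : d ≤ 9) :
    lkp (compoeTab t ch) d = lkp (moveTab ch) (lkp t d) := by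
  have hd : d.toNat < t.length := by omega
  simp [compoeTab, lkp, List.getElem?_eq_getElem hd]

lemma foldl_compoeTab (l : List Char) (t : List Int)
    (hl : ∀ ch ∈ l, ch = 'B' ∨ ch = 'C' ∨ ch = 'D' ∨ ch = 'E') (ht : TabOK t) :
    TabOK (l.foldl compoeTab t)
    ∧ ∀ d : Int, 1 ≤ d → d ≤ 9 → lkp (l.foldl compoeTab t) d = l.foldl stepA (lkp t d) := by
  induction l generalizing t with
  | nil => exact ⟨ht, fun _ _ _ => rfl⟩
  | cons ch l ih =>
    have hstep : ∀ e : Int, 1 ≤ e → e ≤ 9 →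
        lkp (compoeTab t ch) e = stepA (lkp t e) ch
        ∧ 1 ≤ stepA (lkp t e) ch ∧ stepA (lkp t e) ch ≤ 9 := by
      intro e he1 he9
      obtain ⟨he1', he9'⟩ := ht.2 e he1 he9
      rw [lkp_compoeTab t ch e ht.1 he1 he9]
      exact moveTab_lkp ch (hl ch (by simp)) (lkp t e) he1' he9'
    have ht' : TabOK (compoeTab t ch) := by
      refine ⟨by simp [compoeTab, ht.1], fun e he1 he9 => ?_⟩
      obtain ⟨heq, hb1, hb9⟩ := hstep e he1 he9
      rw [heq]; exact ⟨hb1, hb9⟩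
    obtain ⟨htOK, hlk⟩ := ih (compoeTab t ch) (fun c hc => hl c (by simp [hc])) ht'
    refine ⟨htOK, fun d h1 h9 => ?_⟩
    obtain ⟨heq, hb1, hb9⟩ := hstep d h1 h9
    simp only [List.foldl_cons]
    rw [hlk d h1 h9, heq]

-- stepA keeps a digit in 1..9 (same fact as in moveTab_lkp, on A's side)
lemma foldl_stepA_bounds (l : List Char) (d : Int)
    (hl : ∀ ch ∈ l, ch = 'B' ∨ ch = 'C' ∨ ch = 'D' ∨ ch = 'E')
    (h1 : 1 ≤ d) (h9 : d ≤ 9) :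
    1 ≤ l.foldl stepA d ∧ l.foldl stepA d ≤ 9 := by
  induction l generalizing d with
  | nil => exact ⟨h1, h9⟩
  | cons ch l ih =>
    obtain ⟨_, hb1, hb9⟩ := moveTab_lkp ch (hl ch (by simp)) d h1 h9
    exact ih (stepA d ch) (fun c hc => hl c (by simp [hc])) hb1 hb9

lemma identTab_OK : TabOK identTab := by
  refine ⟨rfl, fun d h1 h9 => ?_⟩
  interval_cases d <;> decide

lemma lkp_identTab (d : Int) (h1 : 1 ≤ d) (h9 : d ≤ 9) : lkp identTab d = d := by
  interval_cases d <;> decide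

lemma tabela_eq (s : String) (d : Int)
    (hs : ∀ ch ∈ s.toList, ch = 'B' ∨ ch = 'C' ∨ ch = 'D' ∨ ch = 'E')
    (h1 : 1 ≤ d) (h9 : d ≤ 9) :
    lkp (tabela s) d = obter_digito s d ∧ 1 ≤ obter_digito s d ∧ obter_digito s d ≤ 9 := by
  obtain ⟨_, hlk⟩ := foldl_compoeTab s.toList identTab hs identTab_OK
  refine ⟨?_, foldl_stepA_bounds s.toList d hs h1 h9⟩
  unfold tabela obter_digito
  rw [hlk d h1 h9, lkp_identTab d h1 h9]

lemma loop_eq (rest : List String) (p : Int) (pin : List Int)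
    (hr : ∀ s ∈ rest, ∀ ch ∈ s.toList, ch = 'B' ∨ ch = 'C' ∨ ch = 'D' ∨ ch = 'E')
    (hp : 1 ≤ p ∧ p ≤ 9) :
    pinLoopA rest p pin = pinLoopB (rest.map tabela) p pin := by
  induction rest generalizing p pin with
  | nil => simp [pinLoopA, pinLoopB]
  | cons s t ih =>
    obtain ⟨hm, hb⟩ := tabela_eq s p (hr s (by simp)) hp.1 hp.2
    simp only [pinLoopA, pinLoopB, List.map_cons, hm]
    exact ih (obter_digito s p) _ (fun x hx => hr x (by simp [hx])) hb

-- ===== VERDICT (by name: the statement is the Claim_ definition above) =====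
theorem obter_pin_spec : Claim_equal_obter_pin := by
  intro tuple1 _ hpre
  obtain ⟨h4, h10, hchb⟩ := hpre
  have hch : ∀ s ∈ tuple1, ∀ ch ∈ s.toList, ch = 'B' ∨ ch = 'C' ∨ ch = 'D' ∨ ch = 'E' := by
    simpa [List.all_eq_true] using hchb
  unfold Spec_obter_pin obter_pin obter_pin_alt
  have hanyA : tuple1.any (fun s => s.toList.any
      (fun ch => ch ≠ 'C' ∧ ch ≠ 'B' ∧ ch ≠ 'D' ∧ ch ≠ 'E')) = false := by
    simp only [List.any_eq_false, List.any_eq_true, decide_eq_true_eq, not_exists, not_and]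
    intro s hs ch hc h
    rcases hch s hs ch hc with hh | hh | hh | hh <;> simp [hh] at *
  have hallB : (tuple1.flatMap String.toList).all
      (fun ch => ch = 'B' ∨ ch = 'C' ∨ ch = 'D' ∨ ch = 'E') = true := by
    simp only [List.all_eq_true, List.mem_flatMap, decide_eq_true_eq]
    rintro ch ⟨s, hs, hc⟩
    exact hch s hs ch hc
  rw [if_neg (by omega : ¬ (tuple1.length < 4 ∨ tuple1.length > 10)),
    if_neg (not_not_intro ⟨h4, h10⟩), hanyA, if_neg (not_not_intro hallB)]
  simp only [Bool.false_eq_true, if_false]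
  cases tuple1 with
  | nil => simp at h4
  | cons s rest =>
    show pinLoopA rest (obter_digito s 5) [obter_digito s 5]
        = pinLoopB ((s :: rest).map tabela) 5 []
    obtain ⟨hm, hb⟩ := tabela_eq s 5 (hch s (by simp)) (by norm_num) (by norm_num)
    rw [loop_eq rest (obter_digito s 5) [obter_digito s 5]
      (fun x hx => hch x (by simp [hx])) hb]
    simp [pinLoopB, hm]
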